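-- pv_equiv track=rewrite | github.com/Shine-5705/FetiiAI | utils.py | search_locations
-- ===== SOURCE A (Python) =====
-- from typing import List, Dict, Any, Tuple, Optional
--
-- def search_locations(query: str, locations: List[str], max_results: int = 5) -> List[str]:
--     """Search for locations matching a query."""
--     query_lower = query.lower()
--     matches = []
--
--     for location in locations:
--         if query_lower == location.lower():
--             matches.append(location)
--
--     for location in locations:
--         if query_lower in location.lower() and location not in matches:
--             matches.append(location)
--
--     query_words = query_lower.split()
--     for location in locations:
--         location_lower = location.lower()
--         if (any(word in location_lower for word in query_words) and
--             location not in matches):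
--             matches.append(location)
--
--     return matches[:max_results]
-- ===== SOURCE B (Python) =====
-- def search_locations(query, locations, max_results=5):
--     """Single pass: classify each location into exact/substring/word buckets
--     (with first-occurrence dedup for the non-exact tiers), then concatenate."""
--     q = query.lower()
--     words = q.split()
--     exact, sub, word = [], [], []
--     seen = set()
--     for loc in locations:
--         low = loc.lower()
--         if q == low:
--             exact.append(loc)
--         elif loc not in seen:
--             if q in low:
--                 sub.append(loc)
--                 seen.add(loc)
--             elif any(w in low for w in words):
--                 word.append(loc)
--                 seen.add(loc)
--     return (exact + sub + word)[:max_results]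
-- ===== Notes on version B (the rewrite author's own statement) =====
-- stated objective: alternative
-- what changed: Replaces A's three full passes over locations (each rescanning the growing matches list with 'not in') by a single pass that classifies each location into exact/substring/word buckets with elif precedence and a set for first-occurrence dedup, then concatenates the buckets.
import Mathlib
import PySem

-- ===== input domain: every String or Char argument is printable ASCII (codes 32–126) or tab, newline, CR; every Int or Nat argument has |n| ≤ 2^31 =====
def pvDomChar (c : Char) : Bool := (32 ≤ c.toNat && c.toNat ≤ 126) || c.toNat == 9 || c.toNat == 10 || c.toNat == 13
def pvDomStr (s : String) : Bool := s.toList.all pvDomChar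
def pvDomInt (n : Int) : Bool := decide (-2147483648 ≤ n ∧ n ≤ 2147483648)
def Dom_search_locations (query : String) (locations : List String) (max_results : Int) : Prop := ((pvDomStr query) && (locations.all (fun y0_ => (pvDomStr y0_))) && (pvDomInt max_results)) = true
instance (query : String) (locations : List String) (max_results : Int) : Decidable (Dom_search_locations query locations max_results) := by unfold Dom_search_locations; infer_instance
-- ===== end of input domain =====

set_option maxHeartbeats 1000000


-- B replaces A's three passes over locations by one bucketing pass (exact/substring/
-- word buckets, set-based first-occurrence dedup); return values are proved equal.

-- ===== PORT A =====
-- ('matches' is a reserved token in Lean; the Python variable `matches` is named `ms`)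
def search_locations (query : String) (locations : List String) (max_results : Int) : List String :=
  let query_lower := PySem.Str.lower query
  let ms : List String := locations.foldl
    (fun m location => if query_lower == PySem.Str.lower location then m ++ [location] else m) []
  let ms := locations.foldl
    (fun m location =>
      if PySem.Str.isIn query_lower (PySem.Str.lower location) && !(m.contains location)
      then m ++ [location] else m) ms
  let query_words := PySem.Str.split₀ query_lower
  let ms := locations.foldl
    (fun m location =>
      let location_lower := PySem.Str.lower location
      if (query_words.any (fun word => PySem.Str.isIn word location_lower)) && !(m.contains location)
      then m ++ [location] else m) ms
  PySem.List.slice ms none (some max_results)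

-- ===== PORT B =====
-- B-side helper: the loop body of Source B's single classifying pass
def pvStepB (q : String) (ws : List String)
    (st : List String × List String × List String × PySem.Set String) (loc : String) :
    List String × List String × List String × PySem.Set String :=
  let low := PySem.Str.lower loc
  if q == low then (st.1 ++ [loc], st.2.1, st.2.2.1, st.2.2.2)
  else if PySem.Set.contains st.2.2.2 loc then st
  else if PySem.Str.isIn q low then (st.1, st.2.1 ++ [loc], st.2.2.1, PySem.Set.add st.2.2.2 loc)
  else if ws.any (fun w => PySem.Str.isIn w low) then (st.1, st.2.1, st.2.2.1 ++ [loc], PySem.Set.add st.2.2.2 loc)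
  else st

def search_locations_alt (query : String) (locations : List String) (max_results : Int) : List String :=
  let q := PySem.Str.lower query
  let words := PySem.Str.split₀ q
  let st := locations.foldl (pvStepB q words)
    (([] : List String), ([] : List String), ([] : List String), (PySem.Set.empty : PySem.Set String))
  PySem.List.slice (st.1 ++ st.2.1 ++ st.2.2.1) none (some max_results)

-- ===== PRECONDITION & SPEC =====
def Spec_search_locations (query : String) (locations : List String) (max_results : Int) (out : List String) : Prop := out = search_locations_alt query locations max_results
instance (query : String) (locations : List String) (max_results : Int) (out : List String) : Decidable (Spec_search_locations query locations max_results out) := by unfold Spec_search_locations; infer_instance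

-- ===== CLAIM (what is proved, stated in full; the proofs are below) =====
def Claim_equal_search_locations : Prop := ∀ (query : String) (locations : List String) (max_results : Int), Dom_search_locations query locations max_results → Spec_search_locations query locations max_results (search_locations query locations max_results)

-- ===== LEMMAS AND PROOFS =====

-- predicates on a single location, given the lowered query q and its word list ws
def pvP0 (q x : String) : Bool := q == PySem.Str.lower x
def pvIsq (q x : String) : Bool := PySem.Str.isIn q (PySem.Str.lower x)
def pvAnyw (ws : List String) (x : String) : Bool := ws.any (fun w => PySem.Str.isIn w (PySem.Str.lower x))
def pvP1 (q x : String) : Bool := pvIsq q x && !(pvP0 q x)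
def pvP2 (q : String) (ws : List String) (x : String) : Bool := pvAnyw ws x && !(pvP0 q x || pvP1 q x)

-- first occurrences of xs not already in seen
def pvDd (seen xs : List String) : List String :=
  match xs with
  | [] => []
  | x :: r => if seen.contains x then pvDd seen r else x :: pvDd (seen ++ [x]) r

theorem mem_pvDd (seen xs : List String) (y : String) :
    y ∈ pvDd seen xs ↔ y ∈ xs ∧ y ∉ seen := by
  induction xs generalizing seen with
  | nil => simp [pvDd]
  | cons x r ih =>
    by_cases h : seen.contains x = true
    · rw [pvDd, if_pos h, ih]
      constructor
      · rintro ⟨hy, hn⟩; exact ⟨List.mem_cons_of_mem _ hy, hn⟩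
      · rintro ⟨hy, hn⟩
        rcases List.mem_cons.mp hy with rfl | hy
        · exact absurd (List.contains_iff_mem.mp h) hn
        · exact ⟨hy, hn⟩
    · rw [pvDd, if_neg h, List.mem_cons, ih]
      simp only [List.mem_append, List.mem_singleton]
      constructor
      · rintro (rfl | ⟨hy, hn⟩)
        · exact ⟨List.mem_cons_self, fun hc => h (List.contains_iff_mem.mpr hc)⟩
        · exact ⟨List.mem_cons_of_mem _ hy, fun hc => hn (Or.inl hc)⟩
      · rintro ⟨hy, hn⟩
        rcases List.mem_cons.mp hy with rfl | hy
        · exact Or.inl rfl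
        · by_cases hx : y = x
          · exact Or.inl hx
          · exact Or.inr ⟨hy, fun hc => hc.elim hn (fun h' => hx h')⟩

-- A's passes 2 and 3: an append-if-cond-and-not-member fold, generalized
theorem passA (cond pmem : String → Bool) (xs : List String) :
    ∀ (acc seen : List String),
    (∀ x ∈ xs, acc.contains x = (pmem x || seen.contains x)) →
    xs.foldl (fun m loc => if cond loc && !(m.contains loc) then m ++ [loc] else m) acc
      = acc ++ pvDd seen (xs.filter (fun x => cond x && !(pmem x))) := by
  induction xs with
  | nil => intro acc seen _; simp [pvDd]
  | cons x r ih =>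
    intro acc seen hmem
    have h0 : acc.contains x = (pmem x || seen.contains x) := hmem x List.mem_cons_self
    have hr : ∀ y ∈ r, acc.contains y = (pmem y || seen.contains y) :=
      fun y hy => hmem y (List.mem_cons_of_mem _ hy)
    rw [List.foldl_cons, List.filter_cons]
    by_cases hc : cond x = true
    · by_cases hp : pmem x = true
      · -- in pmem: never appended, filtered out
        have hacc : acc.contains x = true := by rw [h0, hp]; simp
        rw [if_neg (show ¬((cond x && !(acc.contains x)) = true) by rw [hacc]; simp),
            if_neg (show ¬((cond x && !(pmem x)) = true) by rw [hp]; simp),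
            ih acc seen hr]
      · have hp' : pmem x = false := Bool.eq_false_iff.mpr hp
        by_cases hs : seen.contains x = true
        · -- seen: in acc already, dd skips it
          have hacc : acc.contains x = true := by rw [h0, hp', hs]; simp
          rw [if_neg (show ¬((cond x && !(acc.contains x)) = true) by rw [hacc]; simp),
              if_pos (show (cond x && !(pmem x)) = true by rw [hc, hp']; rfl),
              ih acc seen hr, pvDd, if_pos hs]
        · -- fresh: appended, dd keeps it
          have hs' : seen.contains x = false := Bool.eq_false_iff.mpr hs
          have hacc : acc.contains x = false := by rw [h0, hp', hs']; simp
          rw [if_pos (show (cond x && !(acc.contains x)) = true by rw [hacc, hc]; rfl),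
              if_pos (show (cond x && !(pmem x)) = true by rw [hc, hp']; rfl)]
          have hr' : ∀ y ∈ r, (acc ++ [x]).contains y = (pmem y || (seen ++ [x]).contains y) := by
            intro y hy
            have := hr y hy
            simp only [List.contains_append] at *
            rw [this]
            cases pmem y <;> simp
          rw [ih (acc ++ [x]) (seen ++ [x]) hr', pvDd, if_neg (show ¬(seen.contains x = true) by rw [hs']; simp)]
          simp
    · -- cond false: skipped and filtered out
      have hc' : cond x = false := Bool.eq_false_iff.mpr hc
      rw [if_neg (show ¬((cond x && !(acc.contains x)) = true) by rw [hc']; simp),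
          if_neg (show ¬((cond x && !(pmem x)) = true) by rw [hc']; simp),
          ih acc seen hr]

-- A's pass 1 (and B's exact bucket): plain append-if fold is filter
theorem pass1 (p : String → Bool) (xs : List String) :
    ∀ acc : List String,
    xs.foldl (fun m loc => if p loc then m ++ [loc] else m) acc = acc ++ xs.filter p := by
  induction xs with
  | nil => intro acc; simp
  | cons x r ih =>
    intro acc
    rw [List.foldl_cons, List.filter_cons]
    by_cases h : p x = true
    · rw [if_pos h, if_pos h, ih]; simp
    · rw [if_neg h, if_neg h, ih]

-- B's single bucketing pass
theorem passB (q : String) (ws : List String) (xs : List String) :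
    ∀ (E S W : List String) (seen : PySem.Set String),
    (∀ x, x ∈ seen ↔ x ∈ S ∨ x ∈ W) →
    (∀ x ∈ S, pvP1 q x = true) → (∀ x ∈ W, pvP2 q ws x = true) →
    ∃ seen', xs.foldl (pvStepB q ws) (E, S, W, seen)
      = (E ++ xs.filter (pvP0 q), S ++ pvDd S (xs.filter (pvP1 q)), W ++ pvDd W (xs.filter (pvP2 q ws)), seen') := by
  induction xs with
  | nil => intro E S W seen _ _ _; exact ⟨seen, by simp [pvDd]⟩
  | cons x r ih =>
    intro E S W seen hseen hS hW
    rw [List.foldl_cons, List.filter_cons, List.filter_cons, List.filter_cons]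
    by_cases h0 : pvP0 q x = true
    · -- exact branch
      have h1x : pvP1 q x = false := by simp [pvP1, h0]
      have h2x : pvP2 q ws x = false := by simp [pvP2, h0]
      have hstep : pvStepB q ws (E, S, W, seen) x = (E ++ [x], S, W, seen) := by
        simp only [pvStepB]
        rw [if_pos (show (q == PySem.Str.lower x) = true from h0)]
      rw [hstep, if_pos (show pvP0 q x = true from h0),
          if_neg (show ¬(pvP1 q x = true) by rw [h1x]; simp),
          if_neg (show ¬(pvP2 q ws x = true) by rw [h2x]; simp)]
      obtain ⟨s', hs'⟩ := ih (E ++ [x]) S W seen hseen hS hW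
      exact ⟨s', by rw [hs']; simp⟩
    · have h0' : pvP0 q x = false := Bool.eq_false_iff.mpr h0
      rw [if_neg (show ¬(pvP0 q x = true) from h0)]
      by_cases hsn : PySem.Set.contains seen x = true
      · -- already seen: skipped; x is in S or W, so dd skips it too
        have hx : x ∈ S ∨ x ∈ W := (hseen x).mp ((PySem.Set.contains_iff _ _).mp hsn)
        have hstep : pvStepB q ws (E, S, W, seen) x = (E, S, W, seen) := by
          simp only [pvStepB]
          rw [if_neg (show ¬((q == PySem.Str.lower x) = true) from h0), if_pos hsn]
        rw [hstep]
        by_cases h1 : pvP1 q x = true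
        · have hxS : x ∈ S := by
            rcases hx with h | h
            · exact h
            · exact absurd (hW x h) (by simp [pvP2, h1])
          have h2x : pvP2 q ws x = false := by simp [pvP2, h1]
          rw [if_pos (show pvP1 q x = true from h1),
              if_neg (show ¬(pvP2 q ws x = true) by rw [h2x]; simp)]
          obtain ⟨s', hs'⟩ := ih E S W seen hseen hS hW
          refine ⟨s', by rw [hs']; congr 2; rw [pvDd, if_pos (List.contains_iff_mem.mpr hxS)]⟩
        · have h1' : pvP1 q x = false := Bool.eq_false_iff.mpr h1
          rw [if_neg (show ¬(pvP1 q x = true) from h1)]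
          by_cases h2 : pvP2 q ws x = true
          · have hxW : x ∈ W := by
              rcases hx with h | h
              · exact absurd (hS x h) h1
              · exact h
            rw [if_pos (show pvP2 q ws x = true from h2)]
            obtain ⟨s', hs'⟩ := ih E S W seen hseen hS hW
            refine ⟨s', by rw [hs']; congr 3; rw [pvDd, if_pos (List.contains_iff_mem.mpr hxW)]⟩
          · rw [if_neg (show ¬(pvP2 q ws x = true) from h2)]
            exact ih E S W seen hseen hS hW
      · -- fresh
        have hsn' : PySem.Set.contains seen x = false := Bool.eq_false_iff.mpr hsn
        have hxS : x ∉ S := fun h => hsn ((PySem.Set.contains_iff _ _).mpr ((hseen x).mpr (Or.inl h)))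
        have hxW : x ∉ W := fun h => hsn ((PySem.Set.contains_iff _ _).mpr ((hseen x).mpr (Or.inr h)))
        have hxseen : x ∉ seen := fun h => hsn ((PySem.Set.contains_iff _ _).mpr h)
        have hadd : PySem.Set.add seen x = seen ++ [x] := PySem.Set.add_of_not_mem hxseen
        by_cases hi : PySem.Str.isIn q (PySem.Str.lower x) = true
        · -- substring bucket
          have h1 : pvP1 q x = true := by
            simp only [pvP1, pvIsq]; rw [hi, show pvP0 q x = false from h0']; rfl
          have h2x : pvP2 q ws x = false := by simp [pvP2, h1]
          have hstep : pvStepB q ws (E, S, W, seen) x = (E, S ++ [x], W, PySem.Set.add seen x) := by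
            simp only [pvStepB]
            rw [if_neg (show ¬((q == PySem.Str.lower x) = true) from h0),
                if_neg (show ¬(PySem.Set.contains seen x = true) from hsn), if_pos hi]
          rw [hstep, if_pos (show pvP1 q x = true from h1),
              if_neg (show ¬(pvP2 q ws x = true) by rw [h2x]; simp)]
          have hseen' : ∀ y, y ∈ PySem.Set.add seen x ↔ y ∈ S ++ [x] ∨ y ∈ W := by
            intro y; rw [hadd]
            rw [List.mem_append, List.mem_append, List.mem_singleton, hseen y]
            exact or_right_comm
          have hS' : ∀ y ∈ S ++ [x], pvP1 q y = true := by
            intro y hy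
            rcases List.mem_append.mp hy with h | h
            · exact hS y h
            · rw [List.mem_singleton.mp h]; exact h1
          obtain ⟨s', hs'⟩ := ih E (S ++ [x]) W (PySem.Set.add seen x) hseen' hS' hW
          refine ⟨s', ?_⟩
          rw [hs', pvDd, if_neg (fun hc => hxS (List.contains_iff_mem.mp hc))]
          simp
        · have hi' : PySem.Str.isIn q (PySem.Str.lower x) = false := Bool.eq_false_iff.mpr hi
          have h1 : pvP1 q x = false := by simp only [pvP1, pvIsq]; rw [hi']; rfl
          rw [if_neg (show ¬(pvP1 q x = true) by rw [h1]; simp)]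
          by_cases ha : (ws.any (fun w => PySem.Str.isIn w (PySem.Str.lower x))) = true
          · -- word bucket
            have h2 : pvP2 q ws x = true := by
              simp only [pvP2, pvAnyw]; rw [ha, show pvP0 q x = false from h0', h1]; rfl
            have hstep : pvStepB q ws (E, S, W, seen) x = (E, S, W ++ [x], PySem.Set.add seen x) := by
              simp only [pvStepB]
              rw [if_neg (show ¬((q == PySem.Str.lower x) = true) from h0),
                  if_neg (show ¬(PySem.Set.contains seen x = true) from hsn),
                  if_neg (show ¬(PySem.Str.isIn q (PySem.Str.lower x) = true) from hi), if_pos ha]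
            rw [hstep, if_pos (show pvP2 q ws x = true from h2)]
            have hseen' : ∀ y, y ∈ PySem.Set.add seen x ↔ y ∈ S ∨ y ∈ W ++ [x] := by
              intro y; rw [hadd]
              rw [List.mem_append, List.mem_append, List.mem_singleton, hseen y]
              exact or_assoc
            have hW' : ∀ y ∈ W ++ [x], pvP2 q ws y = true := by
              intro y hy
              rcases List.mem_append.mp hy with h | h
              · exact hW y h
              · rw [List.mem_singleton.mp h]; exact h2
            obtain ⟨s', hs'⟩ := ih E S (W ++ [x]) (PySem.Set.add seen x) hseen' hS hW'
            refine ⟨s', ?_⟩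
            rw [hs', pvDd, if_neg (fun hc => hxW (List.contains_iff_mem.mp hc))]
            simp
          · have ha' : (ws.any (fun w => PySem.Str.isIn w (PySem.Str.lower x))) = false := Bool.eq_false_iff.mpr ha
            have h2 : pvP2 q ws x = false := by simp only [pvP2, pvAnyw]; rw [ha']; rfl
            have hstep : pvStepB q ws (E, S, W, seen) x = (E, S, W, seen) := by
              simp only [pvStepB]
              rw [if_neg (show ¬((q == PySem.Str.lower x) = true) from h0),
                  if_neg (show ¬(PySem.Set.contains seen x = true) from hsn),
                  if_neg (show ¬(PySem.Str.isIn q (PySem.Str.lower x) = true) from hi),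
                  if_neg (show ¬((ws.any (fun w => PySem.Str.isIn w (PySem.Str.lower x))) = true) from ha)]
            rw [hstep, if_neg (show ¬(pvP2 q ws x = true) by rw [h2]; simp)]
            exact ih E S W seen hseen hS hW

-- ===== VERDICT (by name: the statement is the Claim_ definition above) =====
theorem search_locations_spec : Claim_equal_search_locations := by
  intro query locations max_results _
  unfold Spec_search_locations search_locations search_locations_alt
  set q := PySem.Str.lower query with hq
  set ws := PySem.Str.split₀ q with hws
  have hA1 : locations.foldl
      (fun m location => if q == PySem.Str.lower location then m ++ [location] else m) []
      = locations.filter (pvP0 q) := by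
    have := pass1 (pvP0 q) locations []
    simpa [pvP0] using this
  have hE : ∀ x ∈ locations, (locations.filter (pvP0 q)).contains x = (pvP0 q x || ([] : List String).contains x) := by
    intro x hx
    simp only [List.contains_nil, Bool.or_false]
    by_cases h : pvP0 q x = true
    · rw [h]; exact List.contains_iff_mem.mpr (List.mem_filter.mpr ⟨hx, h⟩)
    · have h' : pvP0 q x = false := Bool.eq_false_iff.mpr h
      rw [h']
      simp only [Bool.eq_false_iff, ne_eq, List.contains_iff_mem]
      intro hc
      exact h (List.mem_filter.mp hc).2
  have hA2 : locations.foldl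
      (fun m location => if PySem.Str.isIn q (PySem.Str.lower location) && !(m.contains location)
        then m ++ [location] else m) (locations.filter (pvP0 q))
      = locations.filter (pvP0 q) ++ pvDd [] (locations.filter (pvP1 q)) := by
    have h := passA (fun x => PySem.Str.isIn q (PySem.Str.lower x)) (pvP0 q) locations
      (locations.filter (pvP0 q)) [] hE
    have hfilt1 : locations.filter (fun x => PySem.Str.isIn q (PySem.Str.lower x) && !(pvP0 q x))
        = locations.filter (pvP1 q) := by
      apply List.filter_congr; intro x _; simp [pvP1, pvIsq]
    rw [hfilt1] at h
    exact h
  have hM2 : ∀ x ∈ locations,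
      (locations.filter (pvP0 q) ++ pvDd [] (locations.filter (pvP1 q))).contains x
        = ((pvP0 q x || pvP1 q x) || ([] : List String).contains x) := by
    intro x hx
    simp only [List.contains_nil, Bool.or_false, List.contains_append]
    have e1 : (locations.filter (pvP0 q)).contains x = pvP0 q x := by
      have := hE x hx; simpa using this
    have e2 : (pvDd [] (locations.filter (pvP1 q))).contains x = pvP1 q x := by
      by_cases h : pvP1 q x = true
      · rw [h]
        exact List.contains_iff_mem.mpr ((mem_pvDd _ _ _).mpr ⟨List.mem_filter.mpr ⟨hx, h⟩, by simp⟩)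
      · have h' : pvP1 q x = false := Bool.eq_false_iff.mpr h
        rw [h']
        simp only [Bool.eq_false_iff, ne_eq, List.contains_iff_mem]
        intro hc
        exact h (List.mem_filter.mp ((mem_pvDd _ _ _).mp hc).1).2
    rw [e1, e2]
  have hA3 : locations.foldl
      (fun m location => if (ws.any (fun word => PySem.Str.isIn word (PySem.Str.lower location))) && !(m.contains location)
        then m ++ [location] else m)
      (locations.filter (pvP0 q) ++ pvDd [] (locations.filter (pvP1 q)))
      = locations.filter (pvP0 q) ++ pvDd [] (locations.filter (pvP1 q)) ++ pvDd [] (locations.filter (pvP2 q ws)) := by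
    have h := passA (fun x => ws.any (fun w => PySem.Str.isIn w (PySem.Str.lower x)))
      (fun x => pvP0 q x || pvP1 q x) locations
      (locations.filter (pvP0 q) ++ pvDd [] (locations.filter (pvP1 q))) [] hM2
    have hfilt2 : locations.filter (fun x => (ws.any (fun w => PySem.Str.isIn w (PySem.Str.lower x))) && !(pvP0 q x || pvP1 q x))
        = locations.filter (pvP2 q ws) := by
      apply List.filter_congr; intro x _; simp [pvP2, pvAnyw]
    rw [hfilt2] at h
    exact h
  obtain ⟨s', hB⟩ := passB q ws locations [] [] [] PySem.Set.empty
      (by intro x; simp [PySem.Set.empty]) (by intro x h; simp at h) (by intro x h; simp at h)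
  simp only [hA1, hA2]
  rw [hA3, hB]
  simp
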